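-- pv_equiv track=rewrite | github.com/irena-flextool/flextool | flextool/flextoolrunner.py | get_first_steps
-- ===== SOURCE A (Python) =====
-- from collections import OrderedDict
--
-- def get_first_steps(steplists):
--     """
--     get the first step of the current solve and the next solve in execution order.
--     :param steplists: Dictionary containg steplist for each solve, in order
--     :return: Return a dictionary containing tuples of current_first, next first
--     """
--     solve_names = list(steplists.keys())
--     starts = OrderedDict()
--     for index, name in enumerate(solve_names):
--         # last key is a different case
--         if index == (len(solve_names) - 1):
--             starts[name] = (steplists[name][0],)
--         else:
--             starts[name] = (steplists[solve_names[index]][0], steplists[solve_names[index + 1]][0])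
--     return starts
-- ===== SOURCE B (Python) =====
-- from collections import OrderedDict
--
-- def get_first_steps(steplists):
--     rev = []
--     next_first = None
--     for name, steps in reversed(list(steplists.items())):
--         first = steps[0]
--         rev.append((name, (first,) if next_first is None else (first, next_first)))
--         next_first = first
--     starts = OrderedDict()
--     for name, t in reversed(rev):
--         starts[name] = t
--     return starts
-- ===== Notes on version B (the rewrite author's own statement) =====
-- stated objective: alternative
-- what changed: A's forward indexed loop with a last-index branch and index+1 dict lookups is replaced by a single reverse traversal of the items that carries the next solve's first step in an accumulator (no indices, no lookups), followed by reversing the collected pairs into the OrderedDict.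
-- outside the precondition, e.g. on get_first_steps({'a': []}): A raises IndexError, B raises IndexError
import Mathlib
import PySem

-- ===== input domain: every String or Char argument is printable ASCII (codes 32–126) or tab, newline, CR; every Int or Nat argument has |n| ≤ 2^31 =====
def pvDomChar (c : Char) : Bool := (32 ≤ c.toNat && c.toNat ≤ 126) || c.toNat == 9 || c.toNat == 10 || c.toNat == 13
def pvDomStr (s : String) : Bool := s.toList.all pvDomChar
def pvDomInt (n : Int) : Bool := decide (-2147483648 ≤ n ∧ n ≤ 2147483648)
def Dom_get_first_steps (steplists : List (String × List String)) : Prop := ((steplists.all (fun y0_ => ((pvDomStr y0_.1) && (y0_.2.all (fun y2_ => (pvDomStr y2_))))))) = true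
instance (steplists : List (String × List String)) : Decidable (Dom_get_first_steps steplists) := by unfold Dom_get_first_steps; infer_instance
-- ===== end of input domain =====

-- B replaces A's forward indexed loop with an is-last branch and index+1 lookups by a single
-- reverse traversal carrying the next solve's first step in an accumulator (alternative decomposition).

-- ===== PORT A =====
def get_first_steps (steplists : List (String × List String)) : List (String × List String) :=
  let d : PySem.Dict String (List String) := PySem.Dict.mk steplists
  let solve_names := PySem.Dict.keys d
  let starts := (PySem.List.enumerate solve_names 0).foldl
    (fun starts p =>
      if p.1 = (solve_names.length : Int) - 1 then
        PySem.Dict.insert starts p.2 [PySem.List.pyGetD (PySem.Dict.getD d p.2 []) 0 ""]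
      else
        PySem.Dict.insert starts p.2
          [PySem.List.pyGetD (PySem.Dict.getD d (PySem.List.pyGetD solve_names p.1 "") []) 0 "",
           PySem.List.pyGetD (PySem.Dict.getD d (PySem.List.pyGetD solve_names (p.1 + 1) "") []) 0 ""])
    PySem.Dict.empty
  starts.items

-- ===== PORT B =====
def get_first_steps_alt (steplists : List (String × List String)) : List (String × List String) :=
  let d : PySem.Dict String (List String) := PySem.Dict.mk steplists
  let rev := (d.items.reverse).foldl
    (fun (acc : List (String × List String) × Option String) p =>
      let first := PySem.List.pyGetD p.2 0 ""
      (acc.1 ++ [(p.1, match acc.2 with | none => [first] | some nf => [first, nf])], some first))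
    ([], none)
  let starts := rev.1.reverse.foldl
    (fun (s : PySem.Dict String (List String)) p => s.insert p.1 p.2) PySem.Dict.empty
  starts.items

-- ===== PRECONDITION & SPEC =====
-- Pre_ excludes inputs where some solve has a zero-length steplist, on which Python A raises IndexError at [0],
-- and association lists with duplicate keys, which cannot arise from a Python dict argument.
def Pre_get_first_steps (steplists : List (String × List String)) : Prop :=
  (steplists.map Prod.fst).Nodup ∧ ∀ p ∈ steplists, p.2 ≠ []
instance (steplists : List (String × List String)) : Decidable (Pre_get_first_steps steplists) := by
  unfold Pre_get_first_steps; infer_instance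

def pvWitness_get_first_steps : (List (String × List String)) :=
  [("first", ["s1", "s2"]), ("second", ["t1"]), ("third", ["u1"])]

def Spec_get_first_steps (steplists : List (String × List String)) (out : List (String × List String)) : Prop := out = get_first_steps_alt steplists
instance (steplists : List (String × List String)) (out : List (String × List String)) : Decidable (Spec_get_first_steps steplists out) := by unfold Spec_get_first_steps; infer_instance

-- ===== CLAIM (what is proved, stated in full; the proofs are below) =====
def Claim_equal_get_first_steps : Prop := ∀ (steplists : List (String × List String)), Dom_get_first_steps steplists → Pre_get_first_steps steplists → Spec_get_first_steps steplists (get_first_steps steplists)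

-- ===== LEMMAS AND PROOFS =====

-- first step of a (name, steps) pair
def fstOf (p : String × List String) : String := PySem.List.pyGetD p.2 0 ""

def pairTail (o : Option String) : List String := match o with | none => [] | some x => [x]

-- forward characterisation of the result: each entry paired with the first step of its successor,
-- the last entry with pairTail nf
def Fspec : List (String × List String) → Option String → List (String × List String)
  | [], _ => []
  | p :: t, nf =>
    (p.1, fstOf p :: (match t with | [] => pairTail nf | q :: _ => [fstOf q])) :: Fspec t nf

-- what B's reverse fold produces, in traversal (reversed) order
def Gacc : List (String × List String) → Option String → List (String × List String)
  | [], _ => []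
  | p :: t, nf => (p.1, fstOf p :: pairTail nf) :: Gacc t (some (fstOf p))

theorem foldl_G (l : List (String × List String))
    (acc : List (String × List String)) (nf : Option String) :
    (l.foldl (fun (acc : List (String × List String) × Option String) p =>
      (acc.1 ++ [(p.1, match acc.2 with
          | none => [PySem.List.pyGetD p.2 0 ""]
          | some nf => [PySem.List.pyGetD p.2 0 "", nf])],
        some (PySem.List.pyGetD p.2 0 "")))
      (acc, nf)).1 = acc ++ Gacc l nf := by
  induction l generalizing acc nf with
  | nil => simp [Gacc]
  | cons p t ih =>
      simp only [List.foldl_cons, ih, Gacc]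
      cases nf <;> simp [fstOf, pairTail]

theorem map_fst_G (l : List (String × List String)) (nf : Option String) :
    (Gacc l nf).map Prod.fst = l.map Prod.fst := by
  induction l generalizing nf with
  | nil => rfl
  | cons p t ih => simp [Gacc, ih]

theorem F_append_singleton (l : List (String × List String)) (p : String × List String)
    (nf : Option String) :
    Fspec (l ++ [p]) nf = Fspec l (some (fstOf p)) ++ [(p.1, fstOf p :: pairTail nf)] := by
  induction l with
  | nil => rfl
  | cons q t ih =>
      cases t with
      | nil => rfl
      | cons r t' =>
          simp only [List.cons_append, Fspec] at ih ⊢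
          simp_all [pairTail]

theorem G_reverse (l : List (String × List String)) (nf : Option String) :
    (Gacc l.reverse nf).reverse = Fspec l nf := by
  induction l using List.reverseRecOn generalizing nf with
  | nil => rfl
  | append_singleton l' p ih =>
      have h1 : (l' ++ [p]).reverse = p :: l'.reverse := by simp
      rw [h1, F_append_singleton, ← ih]
      simp [Gacc]

theorem F_length (l : List (String × List String)) (nf : Option String) :
    (Fspec l nf).length = l.length := by
  induction l generalizing nf with
  | nil => rfl
  | cons p t ih => simp [Fspec, ih]

theorem F_getElem (l : List (String × List String)) (nf : Option String) (k : Nat)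
    (hk : k < l.length) :
    (Fspec l nf)[k]'(by rw [F_length]; exact hk) =
      (l[k].1, fstOf l[k] ::
        (if h : k + 1 < l.length then [fstOf (l[k + 1]'h)] else pairTail nf)) := by
  induction l generalizing k nf with
  | nil => simp at hk
  | cons p t ih =>
      cases k with
      | zero =>
          cases t with
          | nil => simp [Fspec]
          | cons q t' => simp [Fspec]
      | succ k' =>
          simp only [List.length_cons] at hk
          have := ih nf k' (by omega)
          simp only [Fspec, List.getElem_cons_succ, List.length_cons]
          rw [this]
          by_cases h1 : k' + 1 < t.length
          · rw [dif_pos h1, dif_pos (by omega)]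
          · rw [dif_neg h1, dif_neg (by omega)]

-- A's enumerate-map form equals Fspec l none, under nodup keys (d = Dict.mk l)
theorem A_map_eq_F (l : List (String × List String)) (hnd : (l.map Prod.fst).Nodup) :
    (PySem.List.enumerate (l.map Prod.fst) 0).map
      (fun p => (p.2,
        if p.1 = ((l.map Prod.fst).length : Int) - 1 then
          [PySem.List.pyGetD (PySem.Dict.getD (PySem.Dict.mk l) p.2 []) 0 ""]
        else
          [PySem.List.pyGetD (PySem.Dict.getD (PySem.Dict.mk l)
             (PySem.List.pyGetD (l.map Prod.fst) p.1 "") []) 0 "",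
           PySem.List.pyGetD (PySem.Dict.getD (PySem.Dict.mk l)
             (PySem.List.pyGetD (l.map Prod.fst) (p.1 + 1) "") []) 0 ""])) =
    Fspec l none := by
  have hkeys : (PySem.Dict.mk l).keys.Nodup := by simpa [PySem.Dict.keys_mk] using hnd
  have hget : ∀ (k : Nat) (h : k < l.length),
      PySem.Dict.getD (PySem.Dict.mk l) (l[k].1) [] = l[k].2 := by
    intro k h
    have hm : (l[k].1, l[k].2) ∈ (PySem.Dict.mk l).items := by
      rw [Prod.mk.eta]
      exact List.getElem_mem h
    exact PySem.Dict.getD_of_mem_items _ hm hkeys []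
  apply List.ext_getElem
  · simp [PySem.List.length_enumerate, F_length]
  intro k h1 h2
  simp only [List.length_map, PySem.List.length_enumerate, List.length_map] at h1
  rw [F_getElem l none k (by simpa using h1)]
  simp only [List.getElem_map, PySem.List.getElem_enumerate]
  have hc0 : (0:Int) + (k:Int) = ((k : Nat) : Int) := by omega
  have hc1 : (0:Int) + (k:Int) + 1 = ((k + 1 : Nat) : Int) := by push_cast; ring
  rw [hc1, hc0]
  by_cases hlast : k + 1 < l.length
  · rw [if_neg (by simp only [List.length_map]; omega), dif_pos hlast]
    simp only [PySem.List.pyGetD_natCast]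
    rw [List.getD_eq_getElem (l.map Prod.fst) "" (by simpa using (by omega : k < l.length)),
        List.getD_eq_getElem (l.map Prod.fst) "" (by simpa using hlast)]
    simp only [List.getElem_map]
    rw [hget k (by omega), hget (k+1) hlast]
    simp [fstOf]
  · have hk' : k = l.length - 1 := by omega
    rw [if_pos (by simp only [List.length_map]; omega), dif_neg hlast]
    rw [hget k (by omega)]
    simp [fstOf, pairTail]

-- B equals Fspec l none, under nodup keys
theorem B_eq_F (l : List (String × List String)) (hnd : (l.map Prod.fst).Nodup) :
    get_first_steps_alt l = Fspec l none := by
  have hdef : get_first_steps_alt l =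
      (List.foldl (fun (s : PySem.Dict String (List String)) p => s.insert p.1 p.2)
        PySem.Dict.empty
        ((List.foldl (fun (acc : List (String × List String) × Option String) p =>
            (acc.1 ++ [(p.1, match acc.2 with
                | none => [PySem.List.pyGetD p.2 0 ""]
                | some nf => [PySem.List.pyGetD p.2 0 "", nf])],
              some (PySem.List.pyGetD p.2 0 "")))
          ([], none) l.reverse).1.reverse)).items := rfl
  rw [hdef, foldl_G l.reverse [] none, List.nil_append, G_reverse]
  rw [PySem.Dict.items_foldl_insert_fresh (Fspec l none) Prod.fst Prod.snd
      PySem.Dict.empty (by simp)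
      (by
        have : (Fspec l none).map Prod.fst = l.map Prod.fst := by
          rw [← G_reverse, List.map_reverse, map_fst_G, List.map_reverse, List.reverse_reverse]
        rw [this]; exact hnd)]
  rw [show (PySem.Dict.empty : PySem.Dict String (List String)).items = [] from rfl, List.nil_append]
  simp

-- ===== VERDICT (by name: the statement is the Claim_ definition above) =====
theorem get_first_steps_spec : Claim_equal_get_first_steps := by
  intro steplists _ hpre
  unfold Spec_get_first_steps
  rw [B_eq_F steplists hpre.1]
  unfold get_first_steps
  simp only [PySem.Dict.keys_mk,
    show (fun (x : String × List String) => x.1) = (Prod.fst : String × List String → String) from rfl]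
  have hA : (fun (starts : PySem.Dict String (List String)) (p : Int × String) =>
      if p.1 = ((steplists.map Prod.fst).length : Int) - 1 then
        PySem.Dict.insert starts p.2
          [PySem.List.pyGetD (PySem.Dict.getD (PySem.Dict.mk steplists) p.2 []) 0 ""]
      else
        PySem.Dict.insert starts p.2
          [PySem.List.pyGetD (PySem.Dict.getD (PySem.Dict.mk steplists)
             (PySem.List.pyGetD (steplists.map Prod.fst) p.1 "") []) 0 "",
           PySem.List.pyGetD (PySem.Dict.getD (PySem.Dict.mk steplists)
             (PySem.List.pyGetD (steplists.map Prod.fst) (p.1 + 1) "") []) 0 ""])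
    = (fun starts p => PySem.Dict.insert starts p.2
         (if p.1 = ((steplists.map Prod.fst).length : Int) - 1 then
            [PySem.List.pyGetD (PySem.Dict.getD (PySem.Dict.mk steplists) p.2 []) 0 ""]
          else
            [PySem.List.pyGetD (PySem.Dict.getD (PySem.Dict.mk steplists)
               (PySem.List.pyGetD (steplists.map Prod.fst) p.1 "") []) 0 "",
             PySem.List.pyGetD (PySem.Dict.getD (PySem.Dict.mk steplists)
               (PySem.List.pyGetD (steplists.map Prod.fst) (p.1 + 1) "") []) 0 ""])) := by
    funext starts p; split <;> rfl
  rw [hA]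
  rw [PySem.Dict.items_foldl_insert_fresh (PySem.List.enumerate (steplists.map Prod.fst) 0)
      Prod.snd _ PySem.Dict.empty (by simp)
      (by rw [show (Prod.snd : Int × String → String) = (fun x => x.2) from rfl,
              PySem.List.map_snd_enumerate]; exact hpre.1)]
  rw [show (PySem.Dict.empty : PySem.Dict String (List String)).items = [] from rfl, List.nil_append]
  exact A_map_eq_F steplists hpre.1
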